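-- pv_equiv track=rewrite | github.com/RainTreeCrow/Coding-Assessments | job_execution.py | getMinimumOperations
-- ===== SOURCE A (Python) =====
-- import heapq
--
-- def getMinimumOperations(executionTime, x, y):
--     # Use negative values to simulate a max heap since heapq is a min heap
--     time_left = [-time for time in executionTime]
--     heapq.heapify(time_left)
--
--     # Initialize the current threshold and the number of operations
--     threshold = 0
--     operations = 0
--
--     # Process the heap until it is empty
--     while time_left:
--         # Pop the top element from the heap (negate it to get the actual value)
--         major_time = -heapq.heappop(time_left)
--
--         # If the task's remaining time is below threshold, all tasks are complete
--         if major_time <= threshold: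
--             return operations
--
--         # Update the remaining time for the major task
--         updated_time = major_time - (x - y)
--
--         # Push it back into the heap if it's not yet complete
--         if updated_time > 0:
--             heapq.heappush(time_left, -updated_time)
--
--         # Increment the threshold, meaning all minor tasks have executed for y seconds
--         threshold += y
--
--         # Increment the operation count
--         operations += 1
--
--     # Return the number of operations required to complete all tasks
--     return operations
-- ===== SOURCE B (Python) =====
-- def getMinimumOperations(executionTime, x, y):
--     # Binary search on the number of operations k: with k operations every task
--     # drops by k*y plus (x-y) per dedicated hit, so k is enough iff the total
--     # number of dedicated hits needed, sum of ceil((t - k*y)/(x-y)) over tasks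
--     # still positive after k*y, is at most k. That count is nonincreasing in k.
--     d = x - y
--
--     def ops_needed(k):
--         total = 0
--         ky = k * y
--         for t in executionTime:
--             r = t - ky
--             if r > 0:
--                 total += -(-r // d)
--         return total
--
--     lo = 0
--     hi = sum(t for t in executionTime if t > 0)
--     while lo < hi:
--         mid = (lo + hi) // 2
--         if ops_needed(mid) <= mid:
--             hi = mid
--         else:
--             lo = mid + 1
--     return lo
-- ===== Notes on version B (the rewrite author's own statement) =====
-- stated objective: alternative
-- what changed: Replaces A's heap simulation (one iteration per operation) by a binary search on the number of operations k with an O(n) feasibility check: total dedicated hits sum(ceil((t-k*y)/(x-y))) over tasks with t>k*y must be <= k.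
-- outside the precondition, e.g. on getMinimumOperations([5], 2, 3): A returns 3, B returns 0; on getMinimumOperations([3], 1, 1): A returns 3, B raises ZeroDivisionError; on getMinimumOperations([1], 0, 0): A does not finish within the time limit, B raises ZeroDivisionError
import Mathlib
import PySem

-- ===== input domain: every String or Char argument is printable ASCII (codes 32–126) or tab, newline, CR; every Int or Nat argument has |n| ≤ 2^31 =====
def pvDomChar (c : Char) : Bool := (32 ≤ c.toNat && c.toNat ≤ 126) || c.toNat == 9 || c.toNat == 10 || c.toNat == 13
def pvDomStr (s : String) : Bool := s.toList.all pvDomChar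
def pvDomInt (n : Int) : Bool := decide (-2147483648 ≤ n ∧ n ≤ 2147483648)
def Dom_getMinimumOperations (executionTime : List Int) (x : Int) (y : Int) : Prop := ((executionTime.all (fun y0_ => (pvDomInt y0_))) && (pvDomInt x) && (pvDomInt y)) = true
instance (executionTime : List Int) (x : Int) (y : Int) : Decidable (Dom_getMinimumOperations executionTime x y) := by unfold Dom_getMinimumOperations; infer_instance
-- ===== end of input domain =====

-- B replaces A's max-heap simulation (one loop iteration per operation) by a binary search
-- on the operation count with a linear feasibility check; objective: alternative algorithm.


-- ===== PORT A =====
-- The heapq min-heap is modeled as a plain List Int; heappop = remove one occurrence of the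
-- minimum (PySem.List.min? + List.erase), heappush = append: exact, since only popped VALUES
-- are observable.  The while loop gets a fuel bound; on Pre_ inputs it is never exhausted
-- (proved as part of the equivalence), so the fuel is a pure totality guard.
def goA (x y : Int) : Nat → List Int → Int → Int → Int
  | 0, _, _, ops => ops                -- fuel exhausted: unreachable under Pre_
  | fuel+1, timeLeft, threshold, ops =>
    match PySem.List.min? timeLeft (fun v => v) with
    | none => ops                      -- while time_left: heap empty, fall out of the loop
    | some nm =>
      let majorTime := -nm             -- major_time = -heapq.heappop(time_left)
      if majorTime ≤ threshold then ops
      else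
        let updatedTime := majorTime - (x - y)
        let rest := timeLeft.erase nm
        let timeLeft' := if updatedTime > 0 then rest ++ [-updatedTime] else rest
        goA x y fuel timeLeft' (threshold + y) (ops + 1)

def getMinimumOperations (executionTime : List Int) (x : Int) (y : Int) : Int :=
  let timeLeft := executionTime.map (fun time => -time)
  goA x y ((executionTime.map Int.natAbs).sum + 1) timeLeft 0 0

-- ===== PORT B =====
-- total += -(-r // d)  for each t with r = t - k*y > 0
def opsNeededB (executionTime : List Int) (y d k : Int) : Int :=
  executionTime.foldl
    (fun total t =>
      let r := t - k * y
      if r > 0 then total + (-(PySem.Int.floordiv (-r) d)) else total) 0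

def bsearchB (executionTime : List Int) (y d lo hi : Int) : Int :=
  if h : lo < hi then
    let mid := PySem.Int.floordiv (lo + hi) 2
    if opsNeededB executionTime y d mid ≤ mid then
      bsearchB executionTime y d lo mid
    else
      bsearchB executionTime y d (mid + 1) hi
  else lo
termination_by (hi - lo).toNat
decreasing_by
  · have := (PySem.Int.floordiv_two_mid_bounds (le_of_lt h)).1
    have := PySem.Int.floordiv_lt_iff_lt_mul (a := lo + hi) (b := 2) (q := hi) (by omega)
    omega
  · have := (PySem.Int.floordiv_two_mid_bounds (le_of_lt h)).1
    have := PySem.Int.floordiv_lt_iff_lt_mul (a := lo + hi) (b := 2) (q := hi) (by omega)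
    omega

def getMinimumOperations_alt (executionTime : List Int) (x : Int) (y : Int) : Int :=
  let d := x - y
  let hi := executionTime.foldl (fun acc t => if t > 0 then acc + t else acc) 0
  bsearchB executionTime y d 0 hi

-- ===== PRECONDITION & SPEC =====
-- Pre_ admits the problem's natural domain x > y ≥ 0 (major reduction larger than the minor
-- one, both nonnegative), plus every input whose tasks are all already finished (times ≤ 0),
-- where both programs return 0 for any x, y.  Outside it A diverges on some inputs
-- (e.g. ([1], 0, 0)), and where it does return a value (e.g. ([5], 2, 3) → 3) that value is
-- an artefact of the simulation on an ill-posed instance which B's ceiling division does not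
-- reproduce (B returns 0 there, and raises ZeroDivisionError when x = y).
def Pre_getMinimumOperations (executionTime : List Int) (x : Int) (y : Int) : Prop :=
  (y < x ∧ 0 ≤ y) ∨ (∀ t ∈ executionTime, t ≤ 0)
instance (executionTime : List Int) (x : Int) (y : Int) : Decidable (Pre_getMinimumOperations executionTime x y) := by unfold Pre_getMinimumOperations; infer_instance

def pvWitness_getMinimumOperations : List Int × Int × Int := ([5, 3, 7], 3, 1)

def Spec_getMinimumOperations (executionTime : List Int) (x : Int) (y : Int) (out : Int) : Prop := out = getMinimumOperations_alt executionTime x y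
instance (executionTime : List Int) (x : Int) (y : Int) (out : Int) : Decidable (Spec_getMinimumOperations executionTime x y out) := by unfold Spec_getMinimumOperations; infer_instance

-- ===== CLAIM (what is proved, stated in full; the proofs are below) =====
def Claim_equal_getMinimumOperations : Prop := ∀ (executionTime : List Int) (x : Int) (y : Int), Dom_getMinimumOperations executionTime x y → Pre_getMinimumOperations executionTime x y → Spec_getMinimumOperations executionTime x y (getMinimumOperations executionTime x y)

-- ===== LEMMAS AND PROOFS =====

-- ceiling division ceil(a/d) for d > 0, written as Python's -(-a // d)
def ceilD (a d : Int) : Int := -(PySem.Int.floordiv (-a) d)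

-- hits still needed on a task of remaining time t after k whole operations
def need (y d k t : Int) : Int := max 0 (ceilD (t - k * y) d)

-- total hits needed over the (negated) heap values
def T (y d k : Int) (L : List Int) : Int := (L.map (fun v => need y d k (-v))).sum

theorem ceilD_bracket {a d q : Int} (hd : 0 < d) : ceilD a d = q ↔ (q - 1) * d < a ∧ a ≤ q * d := by
  unfold ceilD; exact PySem.Int.neg_floordiv_neg_eq_iff_of_pos hd

theorem ceilD_le_iff {a d q : Int} (hd : 0 < d) : ceilD a d ≤ q ↔ a ≤ q * d := by
  constructor
  · intro hq
    have h := ((ceilD_bracket (a := a) (d := d) hd).mp rfl).2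
    calc a ≤ ceilD a d * d := h
      _ ≤ q * d := mul_le_mul_of_nonneg_right hq (le_of_lt hd)
  · intro ha
    by_contra hq
    push Not at hq
    have h := ((ceilD_bracket (a := a) (d := d) hd).mp rfl).1
    have : q * d ≤ (ceilD a d - 1) * d := mul_le_mul_of_nonneg_right (by omega) (le_of_lt hd)
    linarith

theorem ceilD_nonpos {a d : Int} (hd : 0 < d) (ha : a ≤ 0) : ceilD a d ≤ 0 := by
  exact (ceilD_le_iff hd).mpr (by simpa using ha)

theorem ceilD_pos {a d : Int} (hd : 0 < d) (ha : 0 < a) : 1 ≤ ceilD a d := by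
  by_contra h
  push Not at h
  have := (ceilD_le_iff hd).mp (by omega : ceilD a d ≤ 0)
  simp at this
  omega

theorem ceilD_mono {a b d : Int} (hd : 0 < d) (hab : a ≤ b) : ceilD a d ≤ ceilD b d := by
  refine (ceilD_le_iff hd).mpr ?_
  exact le_trans hab ((ceilD_bracket (a := b) (d := d) hd).mp rfl).2

theorem need_nonneg (y d k t : Int) : 0 ≤ need y d k t := le_max_left 0 _

theorem need_eq_zero {y d k t : Int} (hd : 0 < d) (h : t - k * y ≤ 0) : need y d k t = 0 := by
  exact max_eq_left (ceilD_nonpos hd h)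

theorem need_pos {y d k t : Int} (hd : 0 < d) (h : 0 < t - k * y) : 1 ≤ need y d k t := by
  exact le_max_of_le_right (ceilD_pos hd h)

theorem need_mono {y d k t : Int} (hd : 0 < d) (hy : 0 ≤ y) :
    need y d (k + 1) t ≤ need y d k t := by
  have h1 : t - (k + 1) * y ≤ t - k * y := by nlinarith
  exact max_le_max le_rfl (ceilD_mono hd h1)

-- one operation on the major task splits its need into the follow-up need plus one hit
theorem need_split {y d k m : Int} (hd : 0 < d) (hky : 0 ≤ k * y) :
    need y d k m = (if m - d > 0 then need y d k (m - d) else 0) +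
      (if m - k * y > 0 then 1 else 0) := by
  by_cases h2 : m - k * y > 0
  · by_cases h1 : m - d > 0
    · -- both positive: ceil(a/d) = ceil((a-d)/d) + 1 with all maxes trivial
      have key : ceilD (m - k * y) d = ceilD (m - d - k * y) d + 1 := by
        have hb := (ceilD_bracket (a := m - d - k * y) (d := d) hd).mp rfl
        exact (ceilD_bracket hd).mpr (by constructor <;> nlinarith [hb.1, hb.2])
      have hge : 0 ≤ ceilD (m - d - k * y) d := by
        by_contra hc
        push Not at hc
        have := (ceilD_le_iff (a := m - d - k * y) (q := -1) hd).mp (by omega)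
        nlinarith
      have hge2 : 1 ≤ ceilD (m - k * y) d := ceilD_pos hd h2
      simp only [need, if_pos h1, if_pos h2]
      rw [max_eq_right (by omega), max_eq_right hge, key]
    · -- one hit finishes the major task: ceil = 1
      have hone : ceilD (m - k * y) d = 1 := by
        refine (ceilD_bracket hd).mpr ?_
        constructor
        · simpa using h2
        · nlinarith
      simp only [need, if_neg h1, if_pos h2]
      rw [max_eq_right (by omega)]
      omega
  · have hz : need y d k m = 0 := need_eq_zero hd (by omega)
    have hz2 : need y d k (m - d) = 0 := need_eq_zero hd (by nlinarith)
    simp only [hz, if_neg h2]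
    split <;> simp [hz2]

theorem T_nonneg (y d k : Int) (L : List Int) : 0 ≤ T y d k L := by
  unfold T
  apply List.sum_nonneg
  intro a ha
  obtain ⟨v, _, rfl⟩ := List.mem_map.mp ha
  exact need_nonneg _ _ _ _

theorem T_erase {y d k : Int} {L : List Int} {v : Int} (hv : v ∈ L) :
    T y d k L = need y d k (-v) + T y d k (L.erase v) := by
  unfold T
  rw [List.Perm.sum_eq (List.Perm.map _ (List.perm_cons_erase hv))]
  simp

theorem T_append (y d k : Int) (L : List Int) (v : Int) :
    T y d k (L ++ [v]) = T y d k L + need y d k (-v) := by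
  unfold T
  simp

theorem T_eq_zero {y d k : Int} {L : List Int}
    (h : ∀ v ∈ L, need y d k (-v) = 0) : T y d k L = 0 := by
  unfold T
  apply List.sum_eq_zero
  intro a ha
  obtain ⟨v, hv, rfl⟩ := List.mem_map.mp ha
  exact h v hv

-- A's loop reaches exactly the first feasible operation count r
theorem goA_eq (x y : Int) (hd : 0 < x - y) (hy : 0 ≤ y) :
    ∀ (fuel : Nat) (L : List Int) (k r : Int), 0 ≤ k → k ≤ r →
      T y (x - y) r L ≤ r - k →
      (∀ j, k ≤ j → j < r → ¬ (T y (x - y) j L ≤ j - k)) →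
      r - k < (fuel : Int) →
      goA x y fuel L (k * y) k = r := by
  intro fuel
  induction fuel with
  | zero =>
    intro L k r hk hkr _ _ hfuel
    simp at hfuel
    omega
  | succ n ih =>
    intro L k r hk hkr hfeas hleast hfuel
    rw [goA]
    cases hmin : PySem.List.min? L (fun v => v) with
    | none =>
      have hL : L = [] := (PySem.List.min?_eq_none_iff L (fun v => v)).mp hmin
      subst hL
      show k = r
      have hz : T y (x - y) k ([] : List Int) = 0 := by simp [T]
      by_cases hlt : k < r
      · exact absurd (by rw [hz]; omega) (hleast k le_rfl hlt)
      · omega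
    | some nm =>
      have hmem : nm ∈ L := PySem.List.min?_mem hmin
      have hmintop : ∀ v ∈ L, nm ≤ v := PySem.List.min?_isMin hmin
      simp only []
      by_cases hth : -nm ≤ k * y
      · -- all remaining tasks are already below the threshold: A returns k, and r = k
        have hz : T y (x - y) k L = 0 := by
          apply T_eq_zero
          intro v hv
          exact need_eq_zero hd (by have := hmintop v hv; omega)
        have hkr' : k = r := by
          by_contra hne
          exact hleast k le_rfl (by omega) (by rw [hz]; omega)
        rw [if_pos hth]
        exact hkr'
      · rw [if_neg hth]
        push Not at hth
        -- for every j ≥ 0, one operation removes exactly the hit the major task loses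
        have hTrel : ∀ j : Int, 0 ≤ j →
            T y (x - y) j (if -nm - (x - y) > 0 then L.erase nm ++ [-(-nm - (x - y))] else L.erase nm)
              = T y (x - y) j L - (if -nm - j * y > 0 then 1 else 0) := by
          intro j hj
          have hsplit := need_split (y := y) (d := x - y) (k := j) (m := -nm) hd (mul_nonneg hj hy)
          have he := T_erase (y := y) (d := x - y) (k := j) hmem
          by_cases hu : -nm - (x - y) > 0
          · rw [if_pos hu, T_append]
            rw [if_pos hu] at hsplit
            have hnn : need y (x - y) j (- -(-nm - (x - y))) = need y (x - y) j (-nm - (x - y)) := by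
              rw [neg_neg]
            omega
          · rw [if_neg hu]
            rw [if_neg hu] at hsplit
            omega
        have h1k : 1 ≤ T y (x - y) k L := by
          have he := T_erase (y := y) (d := x - y) (k := k) hmem
          have hp := need_pos (y := y) (d := x - y) (k := k) (t := -nm) hd (by omega)
          have hnn := T_nonneg y (x - y) k (L.erase nm)
          omega
        have hkr2 : k + 1 ≤ r := by
          rcases eq_or_lt_of_le hkr with rfl | h
          · omega
          · omega
        have hfeas' : T y (x - y) r
            (if -nm - (x - y) > 0 then L.erase nm ++ [-(-nm - (x - y))] else L.erase nm)
              ≤ r - (k + 1) := by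
          by_cases hind : -nm - r * y > 0
          · rw [hTrel r (by omega), if_pos hind]
            omega
          · have hz : T y (x - y) r
                (if -nm - (x - y) > 0 then L.erase nm ++ [-(-nm - (x - y))] else L.erase nm) = 0 := by
              apply T_eq_zero
              intro v hv
              by_cases hu : -nm - (x - y) > 0
              · rw [if_pos hu] at hv
                rcases List.mem_append.mp hv with hv' | hv'
                · have := hmintop v (List.mem_of_mem_erase hv')
                  exact need_eq_zero hd (by omega)
                · have hveq : v = -(-nm - (x - y)) := by simpa using hv'
                  subst hveq
                  exact need_eq_zero hd (by omega)
              · rw [if_neg hu] at hv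
                have := hmintop v (List.mem_of_mem_erase hv)
                exact need_eq_zero hd (by omega)
            rw [hz]
            omega
        have hleast' : ∀ j, k + 1 ≤ j → j < r →
            ¬ (T y (x - y) j
                (if -nm - (x - y) > 0 then L.erase nm ++ [-(-nm - (x - y))] else L.erase nm)
              ≤ j - (k + 1)) := by
          intro j hj1 hj2 hle
          have hnf := hleast j (by omega) hj2
          rw [hTrel j (by omega)] at hle
          split at hle <;> omega
        have hrec := ih _ (k + 1) r (by omega) hkr2 hfeas' hleast' (by push_cast at hfuel ⊢; omega)
        rw [show k * y + y = (k + 1) * y by ring]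
        exact hrec

-- a foldl with a guarded increment is the sum of a guarded map
theorem foldl_if_add (L : List Int) (c : Int → Prop) [DecidablePred c] (g : Int → Int) (a : Int) :
    L.foldl (fun acc t => if c t then acc + g t else acc) a
      = a + (L.map (fun t => if c t then g t else 0)).sum := by
  have hf : (fun (acc t : Int) => if c t then acc + g t else acc)
      = (fun acc t => acc + (if c t then g t else 0)) := by
    funext acc t
    split <;> simp
  rw [hf, PySem.List.foldl_add]

-- B's per-k loop computes the total need
theorem opsNeededB_eq (E : List Int) (y d k : Int) (hd : 0 < d) :
    opsNeededB E y d k = (E.map (fun t => need y d k t)).sum := by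
  unfold opsNeededB
  rw [foldl_if_add E (fun t => t - k * y > 0) (fun t => -(PySem.Int.floordiv (-(t - k * y)) d)) 0]
  rw [zero_add]
  congr 1
  apply List.map_congr_left
  intro t _
  by_cases h : t - k * y > 0
  · rw [if_pos h]
    have : -(PySem.Int.floordiv (-(t - k * y)) d) = ceilD (t - k * y) d := rfl
    rw [this, need, max_eq_right (le_trans zero_le_one (ceilD_pos hd h))]
  · rw [if_neg h, need_eq_zero hd (by omega)]

-- monotone feasibility
theorem feasible_mono (E : List Int) (y d : Int) (hd : 0 < d) (hy : 0 ≤ y) :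
    ∀ j m : Int, 0 ≤ j → j ≤ m → opsNeededB E y d j ≤ j → opsNeededB E y d m ≤ m := by
  intro j m hj hjm hfeas
  have step : ∀ i : Int, 0 ≤ i → opsNeededB E y d i ≤ i → opsNeededB E y d (i + 1) ≤ i + 1 := by
    intro i hi hle
    have hmono : opsNeededB E y d (i + 1) ≤ opsNeededB E y d i := by
      rw [opsNeededB_eq E y d _ hd, opsNeededB_eq E y d _ hd]
      apply List.sum_le_sum
      intro t _
      exact need_mono hd hy
    omega
  have key : ∀ n : Nat, opsNeededB E y d (j + n) ≤ j + n := by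
    intro n
    induction n with
    | zero => simpa using hfeas
    | succ n ihn =>
      have := step (j + n) (by positivity) ihn
      push_cast
      rw [← add_assoc]
      exact this
  have hm : m = j + ((m - j).toNat : Int) := by omega
  rw [hm]
  exact key _

-- binary search returns the least feasible k in [0, hi]
theorem bsearchB_spec (E : List Int) (y d : Int) (hd : 0 < d) (hy : 0 ≤ y) :
    ∀ (lo hi : Int), 0 ≤ lo → lo ≤ hi → opsNeededB E y d hi ≤ hi →
      (∀ j, 0 ≤ j → j < lo → ¬ opsNeededB E y d j ≤ j) →
      0 ≤ bsearchB E y d lo hi ∧ bsearchB E y d lo hi ≤ hi ∧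
        opsNeededB E y d (bsearchB E y d lo hi) ≤ bsearchB E y d lo hi ∧
        (∀ j, 0 ≤ j → j < bsearchB E y d lo hi → ¬ opsNeededB E y d j ≤ j) := by
  intro lo hi
  induction hN0 : (hi - lo).toNat using Nat.strong_induction_on generalizing lo hi with
  | _ N ih =>
  intro h0lo hlohi hPhi hinv
  rw [bsearchB]
  split
  · rename_i h
    have hmid1 := (PySem.Int.floordiv_two_mid_bounds (le_of_lt h)).1
    have hmid2 : PySem.Int.floordiv (lo + hi) 2 < hi := by
      have := PySem.Int.floordiv_lt_iff_lt_mul (a := lo + hi) (b := 2) (q := hi) (by omega)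
      omega
    simp only []
    split
    · rename_i hP
      obtain ⟨a, b, c, e⟩ :=
        ih (PySem.Int.floordiv (lo + hi) 2 - lo).toNat (by omega) lo
          (PySem.Int.floordiv (lo + hi) 2) rfl h0lo (by omega) hP hinv
      exact ⟨a, by omega, c, e⟩
    · rename_i hP
      refine ih (hi - (PySem.Int.floordiv (lo + hi) 2 + 1)).toNat (by omega)
        (PySem.Int.floordiv (lo + hi) 2 + 1) hi rfl (by omega) (by omega) hPhi ?_
      intro j hj0 hj
      by_cases hjlo : j < lo
      · exact hinv j hj0 hjlo
      · intro hPj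
        exact hP (feasible_mono E y d hd hy j _ hj0 (by omega) hPj)
  · rename_i h
    have hlh : lo = hi := by omega
    exact ⟨h0lo, hlohi, by rw [hlh]; exact hPhi, hinv⟩

theorem hiB_spec (E : List Int) (y d : Int) (hd : 0 < d) (hy : 0 ≤ y) :
    let hi := E.foldl (fun acc t => if t > 0 then acc + t else acc) 0
    0 ≤ hi ∧ opsNeededB E y d hi ≤ hi ∧ hi ≤ ((E.map Int.natAbs).sum : Int) := by
  intro hi
  have hhi : hi = (E.map (fun t => if t > 0 then t else 0)).sum := by
    have := foldl_if_add E (fun t => t > 0) (fun t => t) 0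
    simpa [hi] using this
  have h0 : 0 ≤ hi := by
    rw [hhi]
    apply List.sum_nonneg
    intro a ha
    obtain ⟨v, _, rfl⟩ := List.mem_map.mp ha
    split <;> omega
  refine ⟨h0, ?_, ?_⟩
  · rw [opsNeededB_eq E y d _ hd]
    calc (E.map (fun t => need y d hi t)).sum
        ≤ (E.map (fun t => if t > 0 then t else 0)).sum := by
          apply List.sum_le_sum
          intro t _
          by_cases ht : t > 0
          · rw [if_pos ht]
            have h1 : ceilD (t - hi * y) d ≤ t := by
              refine (ceilD_le_iff hd).mpr ?_
              nlinarith [mul_nonneg h0 hy]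
            exact max_le (by omega) h1
          · rw [if_neg ht, need_eq_zero hd (by nlinarith [mul_nonneg h0 hy])]
      _ = hi := hhi.symm
  · have hcast : ((E.map Int.natAbs).sum : Int) = (E.map (fun t => (t.natAbs : Int))).sum := by
      rw [Nat.cast_list_sum, List.map_map]
      rfl
    rw [hhi, hcast]
    apply List.sum_le_sum
    intro t _
    split
    · exact Int.le_natAbs
    · positivity

-- ===== VERDICT (by name: the statement is the Claim_ definition above) =====
-- with every task already finished both programs return 0 immediately, for any x and y
theorem both_zero_of_all_nonpos (E : List Int) (x y : Int) (hall : ∀ t ∈ E, t ≤ 0) :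
    getMinimumOperations E x y = 0 ∧ getMinimumOperations_alt E x y = 0 := by
  constructor
  · unfold getMinimumOperations
    rw [goA]
    cases hmin : PySem.List.min? (E.map fun time => -time) (fun v => v) with
    | none => rfl
    | some nm =>
      have hmem := PySem.List.min?_mem hmin
      obtain ⟨t, ht, rfl⟩ := List.mem_map.mp hmem
      have : -(- t) ≤ 0 := by simpa using hall t ht
      simp only []
      rw [if_pos this]
  · unfold getMinimumOperations_alt
    simp only []
    have hhi : E.foldl (fun acc t => if t > 0 then acc + t else acc) 0 = 0 := by
      rw [foldl_if_add E (fun t => t > 0) (fun t => t) 0, zero_add]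
      apply List.sum_eq_zero
      intro a ha
      obtain ⟨v, hv, rfl⟩ := List.mem_map.mp ha
      rw [if_neg (by have := hall v hv; omega)]
    rw [hhi, bsearchB, dif_neg (by omega)]

theorem getMinimumOperations_spec : Claim_equal_getMinimumOperations := by
  unfold Claim_equal_getMinimumOperations
  intro E x y _ hpre
  rcases hpre with ⟨hxy, hy⟩ | hall
  case inr =>
    obtain ⟨ha, hb⟩ := both_zero_of_all_nonpos E x y hall
    unfold Spec_getMinimumOperations
    rw [ha, hb]
  unfold Spec_getMinimumOperations
  have hd : 0 < x - y := by omega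
  obtain ⟨h0, hP, hle⟩ := hiB_spec E y (x - y) hd hy
  obtain ⟨hr0, hrhi, hrP, hrleast⟩ :=
    bsearchB_spec E y (x - y) hd hy 0
      (E.foldl (fun acc t => if t > 0 then acc + t else acc) 0)
      le_rfl h0 hP (by intro j hj hjlt; omega)
  have hTE : ∀ j : Int,
      T y (x - y) j (E.map (fun time => -time)) = opsNeededB E y (x - y) j := by
    intro j
    rw [opsNeededB_eq E y (x - y) j hd]
    unfold T
    rw [List.map_map]
    congr 1
    apply List.map_congr_left
    intro t _
    simp
  show getMinimumOperations E x y = getMinimumOperations_alt E x y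
  unfold getMinimumOperations getMinimumOperations_alt
  simp only []
  have hmain := goA_eq x y hd hy ((E.map Int.natAbs).sum + 1)
    (E.map (fun time => -time)) 0
    (bsearchB E y (x - y) 0 (E.foldl (fun acc t => if t > 0 then acc + t else acc) 0))
    le_rfl hr0
    (by rw [hTE]; omega)
    (by intro j hj hjlt hc
        rw [hTE] at hc
        exact hrleast j hj hjlt (by omega))
    (by push_cast at hle ⊢; linarith [hrhi, hle])
  rw [zero_mul] at hmain
  exact hmain
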